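-- pv_equiv track=rewrite | github.com/Lblackie1/OrganGeometry | BnlCurvatureCorrelation/FGF_Curvature_Registration.py | splitNames
-- ===== SOURCE A (Python) =====
-- def splitNames(oldNames):
--
--     names1 = []
--     names2 = []
--     names3 = []
--
--     for name in oldNames:
--         if name[0]== "F":
--             names1.append(name)
--
--     for name in oldNames:
--         if name[0]== "V":
--             names2.append(name)
--
--     for name in oldNames:
--         if name[0]== "M":
--             names3.append(name)
--
--     return names1, names2, names3
-- ===== SOURCE B (Python) =====
-- def splitNames(oldNames):
--     names1, names2, names3 = [], [], []
--     for name in oldNames: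
--         c = name[0]
--         if c == "F":
--             names1.append(name)
--         elif c == "V":
--             names2.append(name)
--         elif c == "M":
--             names3.append(name)
--     return names1, names2, names3
-- ===== Notes on version B (the rewrite author's own statement) =====
-- stated objective: simpler
-- what changed: Replaces A's three separate scans of oldNames (one per target letter) with a single pass that inspects each name's first character once and dispatches it to the right bucket.
-- outside the precondition, e.g. on splitNames(['F1', '']): A raises IndexError, B raises IndexError
import Mathlib
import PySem

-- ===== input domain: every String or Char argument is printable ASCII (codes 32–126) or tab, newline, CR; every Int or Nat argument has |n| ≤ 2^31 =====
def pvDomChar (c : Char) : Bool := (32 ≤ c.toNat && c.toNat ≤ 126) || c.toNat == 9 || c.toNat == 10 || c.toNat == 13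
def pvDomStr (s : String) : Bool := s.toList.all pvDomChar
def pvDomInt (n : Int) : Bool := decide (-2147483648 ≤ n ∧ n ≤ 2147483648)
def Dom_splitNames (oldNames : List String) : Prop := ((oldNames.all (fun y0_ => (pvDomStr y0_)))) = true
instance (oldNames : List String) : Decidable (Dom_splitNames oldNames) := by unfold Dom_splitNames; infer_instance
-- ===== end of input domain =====

-- B makes one pass dispatching on the first character instead of A's three scans; return value only.
-- ===== PORT A =====
def splitNames (oldNames : List String) : List String × List String × List String :=
  let names1 := oldNames.foldl (fun acc name =>
    if PySem.Str.pyGet? name 0 = some 'F' then acc ++ [name] else acc) []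
  let names2 := oldNames.foldl (fun acc name =>
    if PySem.Str.pyGet? name 0 = some 'V' then acc ++ [name] else acc) []
  let names3 := oldNames.foldl (fun acc name =>
    if PySem.Str.pyGet? name 0 = some 'M' then acc ++ [name] else acc) []
  (names1, names2, names3)

-- ===== PORT B =====
def splitNames_alt (oldNames : List String) : List String × List String × List String :=
  oldNames.foldl (fun acc name =>
    let c := PySem.Str.pyGet? name 0
    if c = some 'F' then (acc.1 ++ [name], acc.2.1, acc.2.2)
    else if c = some 'V' then (acc.1, acc.2.1 ++ [name], acc.2.2)
    else if c = some 'M' then (acc.1, acc.2.1, acc.2.2 ++ [name])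
    else acc) ([], [], [])

-- ===== PRECONDITION & SPEC =====
-- Pre_ excludes lists containing an empty string: there Python A (and B) raises IndexError on name[0].
def Pre_splitNames (oldNames : List String) : Prop := ∀ s ∈ oldNames, s ≠ ""
instance (oldNames : List String) : Decidable (Pre_splitNames oldNames) := by unfold Pre_splitNames; infer_instance
def pvWitness_splitNames : List String := ["Fa", "Vb", "Mc", "xx"]
def Spec_splitNames (oldNames : List String) (out : List String × List String × List String) : Prop := out = splitNames_alt oldNames
instance (oldNames : List String) (out : List String × List String × List String) : Decidable (Spec_splitNames oldNames out) := by unfold Spec_splitNames; infer_instance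

-- ===== CLAIM (what is proved, stated in full; the proofs are below) =====
def Claim_equal_splitNames : Prop := ∀ (oldNames : List String), Dom_splitNames oldNames → Pre_splitNames oldNames → Spec_splitNames oldNames (splitNames oldNames)

-- ===== LEMMAS AND PROOFS =====
-- B's single fold over a triple equals the triple of A's three folds, for any starting accumulators.
theorem splitNames_fold_eq (xs : List String) (a b c : List String) :
    xs.foldl (fun acc name =>
      let ch := PySem.Str.pyGet? name 0
      if ch = some 'F' then (acc.1 ++ [name], acc.2.1, acc.2.2)
      else if ch = some 'V' then (acc.1, acc.2.1 ++ [name], acc.2.2)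
      else if ch = some 'M' then (acc.1, acc.2.1, acc.2.2 ++ [name])
      else acc) (a, b, c)
    = (xs.foldl (fun acc name => if PySem.Str.pyGet? name 0 = some 'F' then acc ++ [name] else acc) a,
       xs.foldl (fun acc name => if PySem.Str.pyGet? name 0 = some 'V' then acc ++ [name] else acc) b,
       xs.foldl (fun acc name => if PySem.Str.pyGet? name 0 = some 'M' then acc ++ [name] else acc) c) := by
  induction xs generalizing a b c with
  | nil => rfl
  | cons x xs ih =>
      simp only [List.foldl_cons]
      split_ifs <;> simp_all <;> exact ih _ _ _
-- ===== VERDICT (by name: the statement is the Claim_ definition above) =====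
theorem splitNames_spec : Claim_equal_splitNames := by
  intro oldNames _ _
  show splitNames oldNames = splitNames_alt oldNames
  unfold splitNames splitNames_alt
  exact (splitNames_fold_eq oldNames [] [] []).symm
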